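-- pv_equiv track=rewrite | github.com/HN67/advent | advent/year2023/day1.py | find_text_numbers
-- ===== SOURCE A (Python) =====
-- import typing as t
--
-- def find_text_numbers(text: str) -> t.Tuple[int, int]:
--     """Normalize a string by replacing all spellings of digits with the actual digit."""
--     digits = {
--         "one": 1,
--         "two": 2,
--         "three": 3,
--         "four": 4,
--         "five": 5,
--         "six": 6,
--         "seven": 7,
--         "eight": 8,
--         "nine": 9,
--         "1": 1,
--         "2": 2,
--         "3": 3,
--         "4": 4,
--         "5": 5,
--         "6": 6,
--         "7": 7,
--         "8": 8,
--         "9": 9,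
--     }
--     first = min(
--         ((number, text.find(name)) for name, number in digits.items()),
--         # tuples are sorted element wise; if find returned -1
--         # we ensure it will be sorted after anything that was actually found
--         key=lambda pair: (1 if pair[1] == -1 else 0, pair[1]),
--     )
--     # We still use min here because we are reversing the strings
--     last = min(
--         (
--             (
--                 number,
--                 "".join(reversed(text)).find("".join(reversed(name))),
--             )
--             for name, number in digits.items()
--         ),
--         key=lambda pair: (1 if pair[1] == -1 else 0, pair[1]),
--     )
--     return (first[0], last[0])
-- ===== SOURCE B (Python) =====
-- import typing as t
--
-- def find_text_numbers(text: str) -> t.Tuple[int, int]: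
--     """Normalize a string by replacing all spellings of digits with the actual digit."""
--     digits = {
--         "one": 1, "two": 2, "three": 3, "four": 4, "five": 5,
--         "six": 6, "seven": 7, "eight": 8, "nine": 9,
--         "1": 1, "2": 2, "3": 3, "4": 4, "5": 5, "6": 6, "7": 7, "8": 8, "9": 9,
--     }
--     items = list(digits.items())
--     n = len(text)
--     # first: leftmost starting occurrence of any digit name; default 1 (A's tie-break default).
--     first = 1
--     for i in range(n):
--         hit = next((value for name, value in items if text.startswith(name, i)), None)
--         if hit is not None:
--             first = hit
--             break
--     # last: rightmost ENDING occurrence of any digit name (what A's reversed-find computes); default 1.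
--     last = 1
--     for e in range(n, 0, -1):
--         hit = next((value for name, value in items if text.endswith(name, 0, e)), None)
--         if hit is not None:
--             last = hit
--             break
--     return (first, last)
-- ===== Notes on version B (the rewrite author's own statement) =====
-- stated objective: alternative
-- what changed: Replaces A's 18 whole-string find() calls plus 18 string reversals and two key-based min() passes by two direct positional scans with early exit: leftmost position where any digit name starts, and rightmost prefix end where any digit name ends.
import Mathlib
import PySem

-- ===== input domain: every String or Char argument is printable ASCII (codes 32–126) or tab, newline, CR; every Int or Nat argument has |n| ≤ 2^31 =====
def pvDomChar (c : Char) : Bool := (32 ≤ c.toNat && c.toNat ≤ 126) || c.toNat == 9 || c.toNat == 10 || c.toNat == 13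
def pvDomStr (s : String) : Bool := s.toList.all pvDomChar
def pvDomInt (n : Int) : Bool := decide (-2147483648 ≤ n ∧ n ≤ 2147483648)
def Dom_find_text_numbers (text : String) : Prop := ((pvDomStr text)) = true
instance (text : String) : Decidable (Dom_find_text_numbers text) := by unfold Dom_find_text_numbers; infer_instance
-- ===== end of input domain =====

-- B is an alternative algorithm: two positional scans (leftmost start / rightmost end with early
-- exit) instead of A's 18 whole-string find calls, 18 string reversals and two key-based minima.

-- ===== PORT A =====
-- the dict literal's items, in insertion order (all keys distinct)
def pvDigits : List (String × Int) :=
  [("one", 1), ("two", 2), ("three", 3), ("four", 4), ("five", 5), ("six", 6), ("seven", 7),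
   ("eight", 8), ("nine", 9), ("1", 1), ("2", 2), ("3", 3), ("4", 4), ("5", 5), ("6", 6),
   ("7", 7), ("8", 8), ("9", 9)]

-- min(…, key=lambda pair: (1 if pair[1] == -1 else 0, pair[1])) is PySem.List.min2? with the two
-- key components; pvDigits is a nonempty literal, so Python's min always returns and the
-- `.getD (0, 0)` default is unreachable.  `"".join(reversed(text)).find("".join(reversed(name)))`
-- is str.find on the two reversed strings, i.e. PySem.Chars.find on the reversed char lists (exact).
def find_text_numbers (text : String) : Int × Int :=
  let first :=
    (PySem.List.min2? (pvDigits.map (fun p => (p.2, PySem.Str.find text p.1)))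
      (fun pair => if pair.2 == -1 then (1 : Int) else 0) (fun pair => pair.2)).getD (0, 0)
  let last :=
    (PySem.List.min2? (pvDigits.map (fun p =>
        (p.2, PySem.Chars.find text.toList.reverse p.1.toList.reverse)))
      (fun pair => if pair.2 == -1 then (1 : Int) else 0) (fun pair => pair.2)).getD (0, 0)
  (first.1, last.1)

-- ===== PORT B =====
-- the same dict items, names as char lists (Source B's `items`)
def pvItems : List (List Char × Int) :=
  [(['o','n','e'], 1), (['t','w','o'], 2), (['t','h','r','e','e'], 3), (['f','o','u','r'], 4),
   (['f','i','v','e'], 5), (['s','i','x'], 6), (['s','e','v','e','n'], 7),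
   (['e','i','g','h','t'], 8), (['n','i','n','e'], 9),
   (['1'], 1), (['2'], 2), (['3'], 3), (['4'], 4), (['5'], 5), (['6'], 6), (['7'], 7),
   (['8'], 8), (['9'], 9)]

-- Source B's first loop: i ascending = recursion over the remaining suffix text[i:];
-- text.startswith(name, i) is Chars.startswith of that suffix.
def pvScanFirst : List Char → Int
  | [] => 1
  | c :: t =>
    match pvItems.find? (fun p => PySem.Chars.startswith (c :: t) p.1) with
    | some p => p.2
    | none => pvScanFirst t

-- Source B's second loop: e descending from len(text); text.endswith(name, 0, e) is
-- Chars.endswith of the prefix text[:e].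
def pvScanLast (s : List Char) : Nat → Int
  | 0 => 1
  | e + 1 =>
    match pvItems.find? (fun p => PySem.Chars.endswith (s.take (e + 1)) p.1) with
    | some p => p.2
    | none => pvScanLast s e

def find_text_numbers_alt (text : String) : Int × Int :=
  (pvScanFirst text.toList, pvScanLast text.toList text.toList.length)

-- ===== PRECONDITION & SPEC =====
def Spec_find_text_numbers (text : String) (out : Int × Int) : Prop := out = find_text_numbers_alt text
instance (text : String) (out : Int × Int) : Decidable (Spec_find_text_numbers text out) := by unfold Spec_find_text_numbers; infer_instance

-- ===== CLAIM (what is proved, stated in full; the proofs are below) =====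
def Claim_equal_find_text_numbers : Prop := ∀ (text : String), Dom_find_text_numbers text → Spec_find_text_numbers text (find_text_numbers text)

-- ===== LEMMAS AND PROOFS =====

-- the boolean comparison min2? uses on the two key components
def pvLtb (k1 k2 : Int × Int → Int) (y m : Int × Int) : Bool :=
  decide (k1 y < k1 m) || (!decide (k1 m < k1 y) && decide (k2 y < k2 m))

def pvStep (k1 k2 : Int × Int → Int) (acc : Option (Int × Int)) (y : Int × Int) : Option (Int × Int) :=
  match acc with
  | none => some y
  | some m => if pvLtb k1 k2 y m then some y else some m

theorem pvMin2_eq_foldl (xs : List (Int × Int)) (k1 k2 : Int × Int → Int) :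
    PySem.List.min2? xs k1 k2 = xs.foldl (pvStep k1 k2) none := by
  unfold PySem.List.min2? pvStep pvLtb
  congr 1
  funext acc y
  cases acc <;> rfl

theorem pvFoldl_keep (k1 k2 : Int × Int → Int) (x : Int × Int) (l : List (Int × Int))
    (h : ∀ y ∈ l, pvLtb k1 k2 y x = false) :
    l.foldl (pvStep k1 k2) (some x) = some x := by
  induction l with
  | nil => rfl
  | cons y t ih =>
    simp only [List.foldl_cons, pvStep, h y (by simp)]
    exact ih (fun z hz => h z (by simp [hz]))

theorem pvLtb_irrefl (k1 k2 : Int × Int → Int) (x : Int × Int) : pvLtb k1 k2 x x = false := by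
  simp [pvLtb]

theorem pvLtb_asymm (k1 k2 : Int × Int → Int) (x y : Int × Int) (h : pvLtb k1 k2 x y = true) :
    pvLtb k1 k2 y x = false := by
  simp only [pvLtb, Bool.or_eq_true, Bool.and_eq_true, decide_eq_true_eq, Bool.not_eq_true',
    decide_eq_false_iff_not] at h
  simp only [pvLtb, Bool.or_eq_false_iff, Bool.and_eq_false_iff, decide_eq_false_iff_not,
    Bool.not_eq_false', decide_eq_true_eq]
  omega

theorem pvFoldl_phase1 (k1 k2 : Int × Int → Int) (x : Int × Int) (l : List (Int × Int))
    (h : ∀ y ∈ l, y = x ∨ pvLtb k1 k2 x y = true) (acc : Option (Int × Int))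
    (hacc : acc = none ∨ ∃ m, acc = some m ∧ (m = x ∨ pvLtb k1 k2 x m = true)) :
    l.foldl (pvStep k1 k2) acc = none ∨
      ∃ m, l.foldl (pvStep k1 k2) acc = some m ∧ (m = x ∨ pvLtb k1 k2 x m = true) := by
  induction l generalizing acc with
  | nil => exact hacc
  | cons y t ih =>
    rw [List.foldl_cons]
    refine ih (fun z hz => h z (List.mem_cons_of_mem _ hz)) _ ?_
    rcases hacc with rfl | ⟨m, rfl, hm⟩
    · exact Or.inr ⟨y, rfl, h y (List.mem_cons_self ..)⟩
    · simp only [pvStep]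
      split
      · exact Or.inr ⟨y, rfl, h y (List.mem_cons_self ..)⟩
      · exact Or.inr ⟨m, rfl, hm⟩

-- min2? returns x when x is in the list and strictly below (in the lexicographic boolean order)
-- every element that is not equal to it; Python min's first-wins tie-breaking is irrelevant then.
theorem pvMin2_unique (xs : List (Int × Int)) (k1 k2 : Int × Int → Int) (x : Int × Int)
    (hx : x ∈ xs) (h : ∀ y ∈ xs, y = x ∨ pvLtb k1 k2 x y = true) :
    PySem.List.min2? xs k1 k2 = some x := by
  obtain ⟨l₁, l₂, rfl⟩ := List.append_of_mem hx
  rw [pvMin2_eq_foldl, List.foldl_append, List.foldl_cons]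
  have hstep : pvStep k1 k2 (List.foldl (pvStep k1 k2) none l₁) x = some x := by
    rcases pvFoldl_phase1 k1 k2 x l₁ (fun z hz => h z (by simp [hz])) none (Or.inl rfl) with
      hnone | ⟨m, hm, hx'⟩
    · rw [hnone]; rfl
    · rw [hm]
      rcases hx' with rfl | hlt
      · simp [pvStep, pvLtb_irrefl]
      · simp [pvStep, hlt]
  rw [hstep]
  apply pvFoldl_keep
  intro y hy
  rcases h y (by simp [hy]) with rfl | hlt
  · exact pvLtb_irrefl k1 k2 y
  · exact pvLtb_asymm k1 k2 x y hlt

-- min2? of a nonempty list whose keys are all equal returns the head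
theorem pvMin2_const (xs : List (Int × Int)) (k1 k2 : Int × Int → Int) (x : Int × Int)
    (t : List (Int × Int)) (hxs : xs = x :: t)
    (h : ∀ y ∈ t, k1 y = k1 x ∧ k2 y = k2 x) :
    PySem.List.min2? xs k1 k2 = some x := by
  subst hxs
  rw [pvMin2_eq_foldl, List.foldl_cons]
  show List.foldl (pvStep k1 k2) (some x) t = some x
  apply pvFoldl_keep
  intro y hy
  obtain ⟨h1, h2⟩ := h y hy
  simp [pvLtb, h1, h2]

-- literal facts about the digit names, checked by the kernel
def pvItemsRev : List (List Char × Int) := pvItems.map (fun p => (p.1.reverse, p.2))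

theorem pvItems_ne_nil : ∀ p ∈ pvItems, p.1 ≠ [] := by decide
theorem pvItems_noPrefix : ∀ p ∈ pvItems, ∀ q ∈ pvItems, p.1 <+: q.1 → p = q := by decide
theorem pvItems_noSuffix : ∀ p ∈ pvItems, ∀ q ∈ pvItems, p.1 <:+ q.1 → p = q := by decide
theorem pvItemsRev_ne_nil : ∀ p ∈ pvItemsRev, p.1 ≠ [] := by decide
theorem pvItemsRev_noPrefix : ∀ p ∈ pvItemsRev, ∀ q ∈ pvItemsRev, p.1 <+: q.1 → p = q := by decide

-- at any one position of any string, at most one digit name matches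
theorem pvUniqueAt (items : List (List Char × Int))
    (huni : ∀ p ∈ items, ∀ q ∈ items, p.1 <+: q.1 → p = q) (u : List Char)
    (p q : List Char × Int) (hp : p ∈ items) (hq : q ∈ items)
    (h1 : p.1 <+: u) (h2 : q.1 <+: u) : p = q := by
  rcases List.prefix_or_prefix_of_prefix h1 h2 with h | h
  · exact huni p hp q hq h
  · exact (huni q hq p hp h).symm

-- A's min over (value, find) when some name matches: the result is the (unique) name matching at
-- the least matching position i, paired with i
theorem pvMinFind_found (items : List (List Char × Int))
    (huni : ∀ p ∈ items, ∀ q ∈ items, p.1 <+: q.1 → p = q)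
    (u : List Char) (i : Nat) (p : List Char × Int) (hp : p ∈ items) (hpre : p.1 <+: u.drop i)
    (hmin : ∀ j < i, ¬ ∃ q ∈ items, q.1 <+: u.drop j) :
    PySem.List.min2? (items.map fun q => (q.2, PySem.Chars.find u q.1))
      (fun pair => if pair.2 == -1 then (1 : Int) else 0) (fun pair => pair.2)
      = some (p.2, (i : Int)) := by
  have hinf : p.1 <:+: u := List.infix_iff_prefix_suffix.mpr ⟨u.drop i, hpre, List.drop_suffix i u⟩
  have hne : PySem.Chars.find u p.1 ≠ -1 := (PySem.Chars.find_ne_neg_one_iff u p.1).mpr hinf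
  have hge : 0 ≤ PySem.Chars.find u p.1 := by
    have := PySem.Chars.neg_one_le_find u p.1; omega
  obtain ⟨hat, hlt⟩ := PySem.Chars.find_spec hge
  have hfindp : PySem.Chars.find u p.1 = (i : Int) := by
    have h1 : ¬ i < (PySem.Chars.find u p.1).toNat := fun hc => hlt i hc hpre
    have h2 : ¬ (PySem.Chars.find u p.1).toNat < i := fun hc => hmin _ hc ⟨p, hp, hat⟩
    omega
  apply pvMin2_unique
  · exact List.mem_map.mpr ⟨p, hp, by rw [hfindp]⟩
  · intro y hy
    obtain ⟨q, hq, rfl⟩ := List.mem_map.mp hy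
    by_cases hqp : q = p
    · subst hqp; left; rw [hfindp]
    · right
      have hk1x : (((i : Int)) == (-1 : Int)) = false := by
        simp only [beq_eq_false_iff_ne, ne_eq]; omega
      by_cases hfq : PySem.Chars.find u q.1 = -1
      · simp [pvLtb, hfq, hk1x]
      · have hgeq : 0 ≤ PySem.Chars.find u q.1 := by
          have := PySem.Chars.neg_one_le_find u q.1; omega
        obtain ⟨hatq, _⟩ := PySem.Chars.find_spec hgeq
        have h1 : ¬ (PySem.Chars.find u q.1).toNat < i := fun hc => hmin _ hc ⟨q, hq, hatq⟩
        have h2 : (PySem.Chars.find u q.1).toNat ≠ i := by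
          intro hc
          exact hqp (pvUniqueAt items huni (u.drop i) q p hq hp (hc ▸ hatq) hpre)
        have hk1q : ((PySem.Chars.find u q.1) == (-1 : Int)) = false := by
          simp only [beq_eq_false_iff_ne, ne_eq]; exact hfq
        have : (i : Int) < PySem.Chars.find u q.1 := by omega
        simp [pvLtb, hk1x, hk1q]
        omega

-- A's min when no name occurs anywhere: every find is -1, all keys are equal, min is the head
theorem pvMinFind_none (items : List (List Char × Int)) (x : List Char × Int)
    (t : List (List Char × Int)) (hcons : items = x :: t) (u : List Char)
    (h : ∀ q ∈ items, ¬ q.1 <:+: u) :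
    PySem.List.min2? (items.map fun q => (q.2, PySem.Chars.find u q.1))
      (fun pair => if pair.2 == -1 then (1 : Int) else 0) (fun pair => pair.2)
      = some (x.2, PySem.Chars.find u x.1) := by
  subst hcons
  rw [List.map_cons]
  refine pvMin2_const _ _ _ _ _ rfl ?_
  intro y hy
  obtain ⟨q, hq, rfl⟩ := List.mem_map.mp hy
  have hq' : PySem.Chars.find u q.1 = -1 :=
    (PySem.Chars.find_eq_neg_one_iff u q.1).mpr (h q (by simp [hq]))
  have hx' : PySem.Chars.find u x.1 = -1 :=
    (PySem.Chars.find_eq_neg_one_iff u x.1).mpr (h x (by simp))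
  simp [hq', hx']

-- B's first scan, no match anywhere
theorem pvScanFirst_none (s : List Char)
    (h : ∀ i, ¬ ∃ q ∈ pvItems, q.1 <+: s.drop i) : pvScanFirst s = 1 := by
  induction s with
  | nil => rfl
  | cons c t ih =>
    have hfind : pvItems.find? (fun p => PySem.Chars.startswith (c :: t) p.1) = none := by
      rw [List.find?_eq_none]
      intro q hq hb
      exact h 0 ⟨q, hq, by simpa using (PySem.Chars.startswith_iff _ _).mp hb⟩
    simp only [pvScanFirst, hfind]
    exact ih (fun i hex => h (i + 1) (by simpa using hex))

-- B's first scan: returns the value of the name matching at the least matching position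
theorem pvScanFirst_found : ∀ (i : Nat) (s : List Char) (p : List Char × Int), p ∈ pvItems →
    p.1 <+: s.drop i → (∀ j < i, ¬ ∃ q ∈ pvItems, q.1 <+: s.drop j) → pvScanFirst s = p.2 := by
  intro i
  induction i with
  | zero =>
    intro s p hp hpre _
    simp only [List.drop_zero] at hpre
    cases s with
    | nil => exact absurd (List.prefix_nil.mp hpre) (pvItems_ne_nil p hp)
    | cons c t =>
      cases hf : pvItems.find? (fun q => PySem.Chars.startswith (c :: t) q.1) with
      | none =>
        exact absurd ((PySem.Chars.startswith_iff _ _).mpr hpre)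
          (by simpa using (List.find?_eq_none.mp hf) p hp)
      | some q =>
        have hqb := List.find?_some hf
        have hql : q.1 <+: (c :: t) := (PySem.Chars.startswith_iff _ _).mp hqb
        have : q = p := pvUniqueAt pvItems pvItems_noPrefix (c :: t) q p
          (List.mem_of_find?_eq_some hf) hp hql hpre
        simp only [pvScanFirst, hf, this]
  | succ i ih =>
    intro s p hp hpre hmin
    cases s with
    | nil => exact absurd (List.prefix_nil.mp (by simpa using hpre)) (pvItems_ne_nil p hp)
    | cons c t =>
      have hfind : pvItems.find? (fun q => PySem.Chars.startswith (c :: t) q.1) = none := by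
        rw [List.find?_eq_none]
        intro q hq hb
        exact hmin 0 (Nat.succ_pos i) ⟨q, hq, by simpa using (PySem.Chars.startswith_iff _ _).mp hb⟩
      simp only [pvScanFirst, hfind]
      exact ih t p hp (by simpa using hpre)
        (fun j hj hex => hmin (j + 1) (by omega) (by simpa using hex))

-- B's last scan, no match in any prefix
theorem pvScanLast_none (s : List Char)
    (h : ∀ e, ¬ ∃ q ∈ pvItems, q.1 <:+ s.take e) : ∀ e₀, pvScanLast s e₀ = 1 := by
  intro e₀
  induction e₀ with
  | zero => rfl
  | succ e ih =>
    have hfind : pvItems.find? (fun p => PySem.Chars.endswith (s.take (e + 1)) p.1) = none := by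
      rw [List.find?_eq_none]
      intro q hq hb
      exact h (e + 1) ⟨q, hq, (PySem.Chars.endswith_iff _ _).mp hb⟩
    simp only [pvScanLast, hfind]
    exact ih

-- B's last scan: returns the value of the name whose occurrence ends rightmost
theorem pvScanLast_found (s : List Char) : ∀ (e₀ e : Nat) (p : List Char × Int), p ∈ pvItems →
    e ≤ e₀ → p.1 <:+ s.take e →
    (∀ e', e < e' → e' ≤ e₀ → ¬ ∃ q ∈ pvItems, q.1 <:+ s.take e') → pvScanLast s e₀ = p.2 := by
  intro e₀
  induction e₀ with
  | zero =>
    intro e p hp he hsuf _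
    interval_cases e
    exact absurd (List.suffix_nil.mp (by simpa using hsuf)) (pvItems_ne_nil p hp)
  | succ e₀ ih =>
    intro e p hp he hsuf hmax
    by_cases hee : e = e₀ + 1
    · subst hee
      cases hf : pvItems.find? (fun q => PySem.Chars.endswith (s.take (e₀ + 1)) q.1) with
      | none =>
        exact absurd ((PySem.Chars.endswith_iff _ _).mpr hsuf)
          (by simpa using (List.find?_eq_none.mp hf) p hp)
      | some q =>
        have hqb := List.find?_some hf
        have hql : q.1 <:+ s.take (e₀ + 1) := (PySem.Chars.endswith_iff _ _).mp hqb
        have hqeq : q = p := by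
          rcases List.suffix_or_suffix_of_suffix hql hsuf with h | h
          · exact pvItems_noSuffix q (List.mem_of_find?_eq_some hf) p hp h
          · exact (pvItems_noSuffix p hp q (List.mem_of_find?_eq_some hf) h).symm
        simp only [pvScanLast, hf, hqeq]
    · have hfind : pvItems.find? (fun q => PySem.Chars.endswith (s.take (e₀ + 1)) q.1) = none := by
        rw [List.find?_eq_none]
        intro q hq hb
        exact hmax (e₀ + 1) (by omega) (le_refl _) ⟨q, hq, (PySem.Chars.endswith_iff _ _).mp hb⟩
      simp only [pvScanLast, hfind]
      exact ih e p hp (by omega) hsuf (fun e' h1 h2 => hmax e' h1 (by omega))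

-- the A-side pair lists are the pvItems / pvItemsRev pair lists (literal string → char-list bridge)
theorem pvPairsFirst (text : String) :
    (pvDigits.map (fun p => (p.2, PySem.Str.find text p.1)))
      = pvItems.map (fun q => (q.2, PySem.Chars.find text.toList q.1)) := rfl

theorem pvPairsLast (text : String) :
    (pvDigits.map (fun p => (p.2, PySem.Chars.find text.toList.reverse p.1.toList.reverse)))
      = pvItemsRev.map (fun q => (q.2, PySem.Chars.find text.toList.reverse q.1)) := rfl

-- infix of u ↔ prefix of some drop
theorem pvInfix_iff_drop (a u : List Char) : a <:+: u ↔ ∃ i, a <+: u.drop i := by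
  constructor
  · intro h
    obtain ⟨t, hpre, hsuf⟩ := List.infix_iff_prefix_suffix.mp h
    exact ⟨u.length - t.length, by rwa [← List.suffix_iff_eq_drop.mp hsuf]⟩
  · rintro ⟨i, h⟩
    exact List.infix_iff_prefix_suffix.mpr ⟨u.drop i, h, List.drop_suffix i u⟩

-- suffix-of-prefix ↔ reversed-prefix-of-reversed-drop (j ≤ length)
theorem pvRevMatch (u a : List Char) (j : Nat) (hj : j ≤ u.length) :
    a.reverse <+: u.reverse.drop j ↔ a <:+ u.take (u.length - j) := by
  have h1 : (u.take (u.length - j)).reverse = u.reverse.drop j := by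
    rw [List.reverse_take]
    congr 1
    omega
  rw [← h1, List.reverse_prefix]

-- first components agree
theorem pvFirst_eq (text : String) :
    ((PySem.List.min2? (pvItems.map fun q => (q.2, PySem.Chars.find text.toList q.1))
      (fun pair => if pair.2 == -1 then (1 : Int) else 0) (fun pair => pair.2)).getD (0, 0)).1
      = pvScanFirst text.toList := by
  by_cases h : ∃ i, ∃ q ∈ pvItems, q.1 <+: text.toList.drop i
  · obtain ⟨p, hp, hpre⟩ := Nat.find_spec h
    rw [pvMinFind_found pvItems pvItems_noPrefix text.toList (Nat.find h) p hp hpre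
      (fun j hj => Nat.find_min h hj)]
    exact (pvScanFirst_found (Nat.find h) text.toList p hp hpre
      (fun j hj => Nat.find_min h hj)).symm
  · have hni : ∀ q ∈ pvItems, ¬ q.1 <:+: text.toList := by
      intro q hq hinf
      obtain ⟨i, hpre⟩ := (pvInfix_iff_drop q.1 text.toList).mp hinf
      exact h ⟨i, q, hq, hpre⟩
    rw [pvMinFind_none pvItems (['o','n','e'], 1) _ rfl text.toList hni]
    rw [pvScanFirst_none text.toList (fun i hex => h ⟨i, hex⟩)]
    rfl

-- second components agree
theorem pvLast_eq (text : String) :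
    ((PySem.List.min2? (pvItemsRev.map fun q => (q.2, PySem.Chars.find text.toList.reverse q.1))
      (fun pair => if pair.2 == -1 then (1 : Int) else 0) (fun pair => pair.2)).getD (0, 0)).1
      = pvScanLast text.toList text.toList.length := by
  by_cases h : ∃ j, ∃ q ∈ pvItemsRev, q.1 <+: text.toList.reverse.drop j
  · obtain ⟨p', hp', hpre⟩ := Nat.find_spec h
    rw [pvMinFind_found pvItemsRev pvItemsRev_noPrefix text.toList.reverse (Nat.find h) p' hp'
      hpre (fun j hj => Nat.find_min h hj)]
    obtain ⟨p, hp, hpp⟩ := List.mem_map.mp hp'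
    have hj : Nat.find h < text.toList.length := by
      by_contra hc
      have : text.toList.reverse.drop (Nat.find h) = [] := by
        apply List.drop_eq_nil_of_le
        rw [List.length_reverse]; omega
      rw [this] at hpre
      exact pvItemsRev_ne_nil p' hp' (List.prefix_nil.mp hpre)
    have hsuf : p.1 <:+ text.toList.take (text.toList.length - Nat.find h) := by
      apply (pvRevMatch text.toList p.1 (Nat.find h) (by omega)).mp
      rw [← hpp] at hpre
      exact hpre
    have hmax : ∀ e', text.toList.length - Nat.find h < e' → e' ≤ text.toList.length →
        ¬ ∃ q ∈ pvItems, q.1 <:+ text.toList.take e' := by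
      rintro e' h1 h2 ⟨q, hq, hsq⟩
      have hj' : text.toList.length - e' < Nat.find h := by omega
      apply Nat.find_min h hj'
      refine ⟨(q.1.reverse, q.2), List.mem_map.mpr ⟨q, hq, rfl⟩, ?_⟩
      have he : text.toList.length - (text.toList.length - e') = e' := by omega
      refine (pvRevMatch text.toList q.1 (text.toList.length - e') (by omega)).mpr ?_
      rw [he]; exact hsq
    rw [← hpp]
    exact (pvScanLast_found text.toList text.toList.length
      (text.toList.length - Nat.find h) p hp (by omega) hsuf hmax).symm
  · have hnm : ∀ e, ¬ ∃ q ∈ pvItems, q.1 <:+ text.toList.take e := by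
      rintro e ⟨q, hq, hsq⟩
      by_cases he : e ≤ text.toList.length
      · refine h ⟨text.toList.length - e, (q.1.reverse, q.2), List.mem_map.mpr ⟨q, hq, rfl⟩, ?_⟩
        have h2 : text.toList.length - (text.toList.length - e) = e := by omega
        refine (pvRevMatch text.toList q.1 (text.toList.length - e) (by omega)).mpr ?_
        rw [h2]; exact hsq
      · refine h ⟨0, (q.1.reverse, q.2), List.mem_map.mpr ⟨q, hq, rfl⟩, ?_⟩
        have h2 : text.toList.length - 0 = text.toList.length := by omega
        refine (pvRevMatch text.toList q.1 0 (by omega)).mpr ?_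
        rw [h2, List.take_length]
        rw [List.take_of_length_le (by omega)] at hsq
        exact hsq
    rw [pvMinFind_none pvItemsRev (['e','n','o'], 1) _ rfl text.toList.reverse
      (fun q hq hinf => by
        obtain ⟨j, hpre⟩ := (pvInfix_iff_drop q.1 text.toList.reverse).mp hinf
        exact h ⟨j, q, hq, hpre⟩)]
    rw [pvScanLast_none text.toList hnm]
    rfl

-- ===== VERDICT (by name: the statement is the Claim_ definition above) =====
theorem find_text_numbers_spec : Claim_equal_find_text_numbers := by
  intro text _
  unfold Spec_find_text_numbers find_text_numbers find_text_numbers_alt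
  rw [pvPairsFirst, pvPairsLast]
  exact Prod.ext (pvFirst_eq text) (pvLast_eq text)
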